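-- pv_equiv track=rewrite | github.com/Thehy-IT/LAP-python.c | bai15.py | tim_vi_tri_min_max
-- ===== SOURCE A (Python) =====
-- def tim_vi_tri_min_max(mang):
--     """Tìm vị trí của phần tử nhỏ nhất và lớn nhất trong mảng."""
--     min_value = float('inf')
--     max_value = float('-inf')
--     min_pos = (-1, -1)
--     max_pos = (-1, -1)
--
--     for i in range(len(mang)):
--         for j in range(len(mang[i])):
--             if mang[i][j] < min_value:
--                 min_value = mang[i][j]
--                 min_pos = (i, j)
--             if mang[i][j] > max_value:
--                 max_value = mang[i][j]
--                 max_pos = (i, j)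
--
--     return min_pos, max_pos
-- ===== SOURCE B (Python) =====
-- def tim_vi_tri_min_max(mang):
--     """Tìm vị trí của phần tử nhỏ nhất và lớn nhất trong mảng."""
--     cells = [(i, j) for i, row in enumerate(mang) for j in range(len(row))]
--     if not cells:
--         return (-1, -1), (-1, -1)
--     key = lambda p: mang[p[0]][p[1]]
--     return min(cells, key=key), max(cells, key=key)
-- ===== Notes on version B (the rewrite author's own statement) =====
-- stated objective: idiomatic
-- what changed: Replaces the hand-maintained four-variable running min/max tracker with a flattened coordinate list and two separate min/max reductions by a key function, relying on first-occurrence semantics.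
import Mathlib
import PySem

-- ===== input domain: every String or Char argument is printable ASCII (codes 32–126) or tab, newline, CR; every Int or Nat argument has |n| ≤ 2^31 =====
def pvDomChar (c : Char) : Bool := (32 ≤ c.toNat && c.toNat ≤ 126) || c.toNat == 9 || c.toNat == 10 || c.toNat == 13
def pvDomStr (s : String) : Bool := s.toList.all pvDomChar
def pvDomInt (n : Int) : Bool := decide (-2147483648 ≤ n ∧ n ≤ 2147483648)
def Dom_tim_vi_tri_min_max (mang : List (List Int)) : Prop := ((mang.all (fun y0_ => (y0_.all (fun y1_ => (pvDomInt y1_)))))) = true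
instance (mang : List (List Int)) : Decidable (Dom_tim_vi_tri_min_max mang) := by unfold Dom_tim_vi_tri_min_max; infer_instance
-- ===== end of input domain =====

-- B flattens the coordinates once and takes two min/max reductions by a key, instead of A's
-- four-variable running tracker; same cost, more idiomatic.

-- ===== PORT A =====
-- Loop-body helper: one cell (i, j) with value x updates the state
-- (min_value, max_value, min_pos, max_pos); `none` models float('inf') / float('-inf')
-- (an Int compares < inf and > -inf always, which is exactly the `none` branch).
def pvBodyA (i j x : Int)
    (s : Option Int × Option Int × (Int × Int) × (Int × Int)) :
    Option Int × Option Int × (Int × Int) × (Int × Int) :=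
  let s1 := match s.1 with
    | none => (some x, s.2.1, (i, j), s.2.2.2)
    | some m => if x < m then (some x, s.2.1, (i, j), s.2.2.2) else s
  match s1.2.1 with
    | none => (s1.1, some x, s1.2.2.1, (i, j))
    | some m => if m < x then (s1.1, some x, s1.2.2.1, (i, j)) else s1

def tim_vi_tri_min_max (mang : List (List Int)) : (Int × Int) × (Int × Int) :=
  let s := (PySem.List.pyRange 0 (PySem.List.len mang) 1).foldl (fun s i =>
    let row := PySem.List.pyGetD mang i []
    (PySem.List.pyRange 0 (PySem.List.len row) 1).foldl
      (fun s j => pvBodyA i j (PySem.List.pyGetD row j 0) s) s)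
    (none, none, (-1, -1), (-1, -1))
  (s.2.2.1, s.2.2.2)

-- ===== PORT B =====
def pvKeyB (mang : List (List Int)) (p : Int × Int) : Int :=
  PySem.List.pyGetD (PySem.List.pyGetD mang p.1 []) p.2 0

def tim_vi_tri_min_max_alt (mang : List (List Int)) : (Int × Int) × (Int × Int) :=
  let cells := (PySem.List.enumerate mang 0).flatMap
    (fun p => (PySem.List.pyRange 0 (PySem.List.len p.2) 1).map (fun j => (p.1, j)))
  match PySem.List.min? cells (pvKeyB mang), PySem.List.max? cells (pvKeyB mang) with
  | some mn, some mx => (mn, mx)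
  | _, _ => ((-1, -1), (-1, -1))

-- ===== PRECONDITION & SPEC =====
def Spec_tim_vi_tri_min_max (mang : List (List Int)) (out : (Int × Int) × (Int × Int)) : Prop := out = tim_vi_tri_min_max_alt mang
instance (mang : List (List Int)) (out : (Int × Int) × (Int × Int)) : Decidable (Spec_tim_vi_tri_min_max mang out) := by unfold Spec_tim_vi_tri_min_max; infer_instance

-- ===== CLAIM (what is proved, stated in full; the proofs are below) =====
def Claim_equal_tim_vi_tri_min_max : Prop := ∀ (mang : List (List Int)), Dom_tim_vi_tri_min_max mang → Spec_tim_vi_tri_min_max mang (tim_vi_tri_min_max mang)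

-- ===== LEMMAS AND PROOFS =====

-- The A-state determined by the first-minimal and first-maximal cells seen so far.
def pvPack (k : Int × Int → Int) (mn mx : Option (Int × Int)) :
    Option Int × Option Int × (Int × Int) × (Int × Int) :=
  (mn.map k, mx.map k, mn.getD (-1, -1), mx.getD (-1, -1))

def pvMinStep (k : Int × Int → Int) (acc : Option (Int × Int)) (c : Int × Int) :
    Option (Int × Int) :=
  match acc with
  | none => some c
  | some m => if k c < k m then some c else some m

def pvMaxStep (k : Int × Int → Int) (acc : Option (Int × Int)) (c : Int × Int) :
    Option (Int × Int) :=
  match acc with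
  | none => some c
  | some m => if k m < k c then some c else some m

theorem pvBodyA_pack (k : Int × Int → Int) (c : Int × Int) (mn mx : Option (Int × Int)) :
    pvBodyA c.1 c.2 (k c) (pvPack k mn mx)
      = pvPack k (pvMinStep k mn c) (pvMaxStep k mx c) := by
  cases mn <;> cases mx <;>
    simp only [pvBodyA, pvPack, pvMinStep, pvMaxStep, Option.map, Option.getD] <;>
    split_ifs <;> simp <;> (intro h2; exfalso; linarith)

theorem pvFoldl_pack (k : Int × Int → Int) :
    ∀ (cs : List (Int × Int)) (mn mx : Option (Int × Int)),
    cs.foldl (fun s c => pvBodyA c.1 c.2 (k c) s) (pvPack k mn mx)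
      = pvPack k (cs.foldl (pvMinStep k) mn) (cs.foldl (pvMaxStep k) mx) := by
  intro cs
  induction cs with
  | nil => intro mn mx; rfl
  | cons c t ih =>
      intro mn mx
      simp only [List.foldl_cons, pvBodyA_pack, ih]

theorem pvFoldl_flatMap {α β σ : Type} (f : α → List β) (g : σ → β → σ) :
    ∀ (l : List α) (init : σ),
    l.foldl (fun s a => (f a).foldl g s) init = (l.flatMap f).foldl g init := by
  intro l
  induction l with
  | nil => intro init; rfl
  | cons a t ih =>
      intro init
      simp only [List.foldl_cons, List.flatMap_cons, List.foldl_append, ih]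

theorem pvMin?_eq (k : Int × Int → Int) (cs : List (Int × Int)) :
    PySem.List.min? cs k = cs.foldl (pvMinStep k) none := by
  simp only [PySem.List.min?]
  congr 1
  funext acc c
  cases acc <;> rfl

theorem pvMax?_eq (k : Int × Int → Int) (cs : List (Int × Int)) :
    PySem.List.max? cs k = cs.foldl (pvMaxStep k) none := by
  simp only [PySem.List.max?]
  congr 1
  funext acc c
  cases acc <;> rfl

theorem pvMinFold_some_ne (k : Int × Int → Int) :
    ∀ (cs : List (Int × Int)) (c : Int × Int),
    cs.foldl (pvMinStep k) (some c) ≠ none := by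
  intro cs
  induction cs with
  | nil => intro c h; simp at h
  | cons d t ih =>
      intro c
      simp only [List.foldl_cons, pvMinStep]
      split_ifs <;> exact ih _

theorem pvMaxFold_some_ne (k : Int × Int → Int) :
    ∀ (cs : List (Int × Int)) (c : Int × Int),
    cs.foldl (pvMaxStep k) (some c) ≠ none := by
  intro cs
  induction cs with
  | nil => intro c h; simp at h
  | cons d t ih =>
      intro c
      simp only [List.foldl_cons, pvMaxStep]
      split_ifs <;> exact ih _

-- ===== VERDICT (by name: the statement is the Claim_ definition above) =====
theorem tim_vi_tri_min_max_spec : Claim_equal_tim_vi_tri_min_max := by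
  intro mang _
  unfold Spec_tim_vi_tri_min_max
  simp only [tim_vi_tri_min_max, tim_vi_tri_min_max_alt]
  have hcells :
      (PySem.List.enumerate mang 0).flatMap
          (fun p => (PySem.List.pyRange 0 (PySem.List.len p.2) 1).map (fun j => (p.1, j)))
        = (PySem.List.pyRange 0 (PySem.List.len mang) 1).flatMap
          (fun i => (PySem.List.pyRange 0 (PySem.List.len (PySem.List.pyGetD mang i [])) 1).map
            (fun j => (i, j))) := by
    rw [PySem.List.enumerate_eq_map_pyRange mang ([] : List Int), List.flatMap_map]
  rw [hcells]
  set k := pvKeyB mang with hk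
  set cells := (PySem.List.pyRange 0 (PySem.List.len mang) 1).flatMap
      (fun i => (PySem.List.pyRange 0 (PySem.List.len (PySem.List.pyGetD mang i [])) 1).map
        (fun j => (i, j))) with hc
  have hA :
      (PySem.List.pyRange 0 (PySem.List.len mang) 1).foldl (fun s i =>
        (PySem.List.pyRange 0 (PySem.List.len (PySem.List.pyGetD mang i [])) 1).foldl
          (fun s j => pvBodyA i j (PySem.List.pyGetD (PySem.List.pyGetD mang i []) j 0) s) s)
        ((none, none, (-1, -1), (-1, -1)) :
          Option Int × Option Int × (Int × Int) × (Int × Int))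
      = pvPack k (cells.foldl (pvMinStep k) none) (cells.foldl (pvMaxStep k) none) := by
    have h1 : ∀ (i : Int) (s : Option Int × Option Int × (Int × Int) × (Int × Int)),
        (PySem.List.pyRange 0 (PySem.List.len (PySem.List.pyGetD mang i [])) 1).foldl
          (fun s j => pvBodyA i j (PySem.List.pyGetD (PySem.List.pyGetD mang i []) j 0) s) s
        = ((PySem.List.pyRange 0 (PySem.List.len (PySem.List.pyGetD mang i [])) 1).map
            (fun j => (i, j))).foldl (fun s c => pvBodyA c.1 c.2 (k c) s) s := by
      intro i s
      rw [List.foldl_map]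
      rfl
    calc
      (PySem.List.pyRange 0 (PySem.List.len mang) 1).foldl (fun s i =>
          (PySem.List.pyRange 0 (PySem.List.len (PySem.List.pyGetD mang i [])) 1).foldl
            (fun s j => pvBodyA i j (PySem.List.pyGetD (PySem.List.pyGetD mang i []) j 0) s) s)
          ((none, none, (-1, -1), (-1, -1)) :
            Option Int × Option Int × (Int × Int) × (Int × Int))
        = (PySem.List.pyRange 0 (PySem.List.len mang) 1).foldl (fun s i =>
            ((PySem.List.pyRange 0 (PySem.List.len (PySem.List.pyGetD mang i [])) 1).map
              (fun j => (i, j))).foldl (fun s c => pvBodyA c.1 c.2 (k c) s) s)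
            (none, none, (-1, -1), (-1, -1)) := by
          exact PySem.List.foldl_congr_mem _ _ _ _ (by intro s i _; exact h1 i s)
      _ = cells.foldl (fun s c => pvBodyA c.1 c.2 (k c) s)
            (none, none, (-1, -1), (-1, -1)) := by
          rw [hc]
          exact pvFoldl_flatMap _ _ _ _
      _ = pvPack k (cells.foldl (pvMinStep k) none) (cells.foldl (pvMaxStep k) none) := by
          have := pvFoldl_pack k cells none none
          simpa [pvPack] using this
  rw [hA, pvMin?_eq, pvMax?_eq]
  rcases hmn : cells.foldl (pvMinStep k) none with _ | mn <;>
    rcases hmx : cells.foldl (pvMaxStep k) none with _ | mx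
  · rfl
  · exfalso
    cases hc2 : cells with
    | nil => rw [hc2] at hmx; simp at hmx
    | cons c t =>
        rw [hc2] at hmn
        exact pvMinFold_some_ne k t c (by simpa [pvMinStep] using hmn)
  · exfalso
    cases hc2 : cells with
    | nil => rw [hc2] at hmn; simp at hmn
    | cons c t =>
        rw [hc2] at hmx
        exact pvMaxFold_some_ne k t c (by simpa [pvMaxStep] using hmx)
  · rfl
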